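-- pv_equiv track=rewrite | github.com/Guillecal/TFG-Herramienta_para_medir_la_eficiencia_de_codigo_python | Prueba TFG/Pruebas/holamundo8.py | exponenciacion_divide_y_venceras
-- ===== SOURCE A (Python) =====
-- def exponenciacion_divide_y_venceras(n):
--     """
--     Utiliza el método divide y vencerás para indicar cómo elevar a la n, siendo
--     n un número natural.
--     Devuelve una lista, donde cada elemento se corresponde con una
--     multiplicación.
--     Las multiplicaciones se representan como tuplas de 3 elementos: el
--     exponente del resultado y los exponentes de los dos elementos multiplicados,
--     en orden decreciente.
--     Las multiplicaciones tienen que estar en la lista en el orden en el que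
--     se realizarían.
--     """
--     lista=[]
--     while n>1:
--         lista1=()
--         if(n%2==0):
--             result=(n/2)
--             lista1=(int(n),int(result),int(result))
--             n=result
--             lista.append(lista1)
--         else:
--             result=(n-1)
--             lista1=(int(n),int(result),1)
--             n=result
--             lista.append(lista1)
--     return list(reversed(lista))
-- ===== SOURCE B (Python) =====
-- def exponenciacion_divide_y_venceras(n):
--     # Bottom-up over the binary digits of n (MSB to LSB), starting from the base exponent:
--     # each further bit squares the current exponent, a 1-bit additionally multiplies by x.
--     if n <= 1:
--         return []
--     steps = []
--     e = 1
--     for bit in bin(int(n))[3:]:  # binary digits after the leading 1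
--         steps.append((2 * e, e, e))
--         e *= 2
--         if bit == '1':
--             steps.append((e + 1, e, 1))
--             e += 1
--     return steps
-- ===== Notes on version B (the rewrite author's own statement) =====
-- stated objective: alternative
-- what changed: Replaces A's downward halving while-loop that accumulates steps and reverses them at the end with a bottom-up pass over the binary digits of n (MSB to LSB) that builds the steps from the base exponent upward, directly in execution order with no reversal.
import Mathlib
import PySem

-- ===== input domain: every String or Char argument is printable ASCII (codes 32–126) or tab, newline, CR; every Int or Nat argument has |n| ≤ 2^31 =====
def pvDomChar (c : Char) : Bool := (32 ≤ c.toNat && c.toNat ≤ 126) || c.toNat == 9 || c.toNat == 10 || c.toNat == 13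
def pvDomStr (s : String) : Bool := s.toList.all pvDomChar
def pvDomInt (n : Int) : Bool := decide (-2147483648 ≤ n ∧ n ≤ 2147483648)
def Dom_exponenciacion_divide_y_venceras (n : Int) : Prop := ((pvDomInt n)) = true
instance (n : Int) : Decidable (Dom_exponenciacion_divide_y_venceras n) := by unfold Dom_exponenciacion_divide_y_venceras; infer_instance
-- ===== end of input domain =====

-- B builds the steps bottom-up over the binary digits of n instead of A's top-down
-- halving loop with a final reversal (objective: alternative).
-- Python's n/2 on an even int n is an exact float; int(n/2) equals Lean's n / 2 here.

-- ===== PORT A =====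
-- the while-loop of A: appends one tuple per iteration to the accumulator `lista`
def pvA_loop (n : Int) (lista : List (Int × Int × Int)) : List (Int × Int × Int) :=
  if h : n > 1 then
    if n % 2 == 0 then
      pvA_loop (n / 2) (lista ++ [(n, n / 2, n / 2)])
    else
      pvA_loop (n - 1) (lista ++ [(n, n - 1, 1)])
  else lista
termination_by n.toNat
decreasing_by all_goals omega

def exponenciacion_divide_y_venceras (n : Int) : List (Int × Int × Int) :=
  (pvA_loop n []).reverse

-- ===== PORT B =====
-- bin(n)[3:] of Source B: the binary digits of n after the leading 1, MSB first
-- (exact for n ≥ 2: Python's bin gives '0b1<these digits>')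
def pvBitsAfterMSB (m : Nat) : List Bool :=
  if m ≤ 1 then [] else pvBitsAfterMSB (m / 2) ++ [m % 2 == 1]

-- the body of Source B's for-loop over one digit, state = (e, steps)
def pvB_step (st : Int × List (Int × Int × Int)) (bit : Bool) : Int × List (Int × Int × Int) :=
  let e := st.1
  let steps := st.2 ++ [(2 * e, e, e)]
  let e := 2 * e
  if bit then (e + 1, steps ++ [(e + 1, e, 1)]) else (e, steps)

def exponenciacion_divide_y_venceras_alt (n : Int) : List (Int × Int × Int) :=
  if n ≤ 1 then []
  else ((pvBitsAfterMSB n.toNat).foldl pvB_step (1, [])).2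

-- ===== PRECONDITION & SPEC =====
def Spec_exponenciacion_divide_y_venceras (n : Int) (out : List (Int × Int × Int)) : Prop := out = exponenciacion_divide_y_venceras_alt n
instance (n : Int) (out : List (Int × Int × Int)) : Decidable (Spec_exponenciacion_divide_y_venceras n out) := by unfold Spec_exponenciacion_divide_y_venceras; infer_instance

-- ===== CLAIM (what is proved, stated in full; the proofs are below) =====
def Claim_equal_exponenciacion_divide_y_venceras : Prop := ∀ (n : Int), Dom_exponenciacion_divide_y_venceras n → Spec_exponenciacion_divide_y_venceras n (exponenciacion_divide_y_venceras n)

-- ===== LEMMAS AND PROOFS =====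

-- proof-side reference function: the divide-and-conquer recurrence in forward order
def pvRec (n : Int) : List (Int × Int × Int) :=
  if h : n > 1 then
    if n % 2 == 0 then pvRec (n / 2) ++ [(n, n / 2, n / 2)]
    else pvRec (n - 1) ++ [(n, n - 1, 1)]
  else []
termination_by n.toNat
decreasing_by all_goals omega

-- A's loop produces the accumulator followed by pvRec's result reversed
theorem pvA_loop_eq (n : Int) (lista : List (Int × Int × Int)) :
    pvA_loop n lista = lista ++ (pvRec n).reverse := by
  induction n, lista using pvA_loop.induct with
  | case1 n lista h hev ih =>
      conv_rhs => rw [pvRec, dif_pos h, if_pos hev]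
      rw [pvA_loop, dif_pos h, if_pos hev, ih]
      simp
  | case2 n lista h hev ih =>
      conv_rhs => rw [pvRec, dif_pos h, if_neg hev]
      rw [pvA_loop, dif_pos h, if_neg hev, ih]
      simp
  | case3 n lista h =>
      rw [pvA_loop, dif_neg h, pvRec, dif_neg h]
      simp

-- B's fold over the binary digits of m ends at exponent m with steps pvRec m
theorem pvB_fold_eq (m : Nat) (hm : 1 ≤ m) :
    (pvBitsAfterMSB m).foldl pvB_step (1, []) = ((m : Int), pvRec (m : Int)) := by
  induction m using pvBitsAfterMSB.induct with
  | case1 m h =>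
      have : m = 1 := by omega
      subst this
      rw [pvBitsAfterMSB]
      simp [pvRec]
  | case2 m h ih =>
      have h2 : 2 ≤ m := by omega
      have ihh := ih (by omega)
      rw [pvBitsAfterMSB, if_neg h, List.foldl_append, ihh]
      have hdiv : ((m / 2 : Nat) : Int) = (m : Int) / 2 := by omega
      have hgt : ((m : Int) > 1) := by exact_mod_cast h2
      rcases Nat.even_or_odd m with he | ho
      · have hm2 : m % 2 = 0 := Nat.even_iff.mp he
        have hb : (m % 2 == 1) = false := by simp [hm2]
        have hev : ((m : Int) % 2 == 0) = true := by simp; omega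
        conv_rhs => rw [pvRec, dif_pos hgt, if_pos hev]
        simp only [hb, List.foldl_cons, List.foldl_nil, pvB_step, Bool.false_eq_true,
          if_false]
        rw [← hdiv]
        have h2m : 2 * ((m / 2 : Nat) : Int) = (m : Int) := by omega
        rw [h2m]
      · have hm2 : m % 2 = 1 := Nat.odd_iff.mp ho
        have hb : (m % 2 == 1) = true := by simp [hm2]
        have h3 : 3 ≤ m := by omega
        have hodd : ¬ (((m : Int) % 2 == 0) = true) := by simp; omega
        have hgt1 : ((m : Int) - 1 > 1) := by
          have : (3 : Int) ≤ (m : Int) := by exact_mod_cast h3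
          omega
        have hev1 : (((m : Int) - 1) % 2 == 0) = true := by simp; omega
        conv_rhs => rw [pvRec, dif_pos hgt, if_neg hodd, pvRec, dif_pos hgt1, if_pos hev1]
        simp only [hb, List.foldl_cons, List.foldl_nil, pvB_step, if_true]
        have e2 : ((m : Int) - 1) / 2 = ((m / 2 : Nat) : Int) := by omega
        have e3 : ((m : Int) - 1) = 2 * ((m / 2 : Nat) : Int) := by omega
        rw [e2, ← e3]
        have e4 : (m : Int) - 1 + 1 = (m : Int) := by omega
        rw [e4]

-- ===== VERDICT (by name: the statement is the Claim_ definition above) =====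
theorem exponenciacion_divide_y_venceras_spec : Claim_equal_exponenciacion_divide_y_venceras := by
  intro n _
  unfold Spec_exponenciacion_divide_y_venceras exponenciacion_divide_y_venceras
           exponenciacion_divide_y_venceras_alt
  rw [pvA_loop_eq]
  by_cases h : n ≤ 1
  · rw [if_pos h, pvRec, dif_neg (by omega)]
    simp
  · rw [if_neg h]
    have h1 : 1 ≤ n.toNat := by omega
    rw [pvB_fold_eq n.toNat h1]
    have : ((n.toNat : Int)) = n := by omega
    rw [this]
    simp
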